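-- pv_equiv track=rewrite | github.com/WallerTsai/OJ-Solution | leetcode-py/二分算法/查找/LCP08.py | getTriggerTime
-- ===== SOURCE A (Python) =====
-- from bisect import bisect_left
-- from typing import List
--
-- def getTriggerTime(increase: List[List[int]], requirements: List[List[int]]) -> List[int]:
--     C = [0]
--     R = [0]
--     H = [0]
--     for c,r,h in increase:
--         C.append(C[-1]+c)
--         R.append(R[-1]+r)
--         H.append(H[-1]+h)
--     res = []
--     length = len(C)
--     for c_,r_,h_ in requirements:
--         t1 = bisect_left(C,c_)
--         t2 = bisect_left(R,r_)
--         t3 = bisect_left(H,h_)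
--
--         t = max(t1,t2,t3)
--         if t == length:
--             res.append(-1)
--         else:
--             res.append(t)
--     return res  # 261ms
-- ===== SOURCE B (Python) =====
-- from typing import List
--
-- def _bl(states, key, x, lo, hi):
--     # recursive binary search: first position where key(state) would keep x left of it
--     if lo >= hi:
--         return lo
--     mid = (lo + hi) // 2
--     if key(states[mid]) < x:
--         return _bl(states, key, x, mid + 1, hi)
--     return _bl(states, key, x, lo, mid)
--
-- def getTriggerTime(increase: List[List[int]], requirements: List[List[int]]) -> List[int]:
--     # one list of cumulative (c, r, h) state triples instead of three parallel lists
--     states = [(0, 0, 0)]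
--     c = r = h = 0
--     for dc, dr, dh in increase:
--         c += dc
--         r += dr
--         h += dh
--         states.append((c, r, h))
--     n1 = len(states)
--     res = []
--     for cq, rq, hq in requirements:
--         t = max(_bl(states, lambda s: s[0], cq, 0, n1),
--                 _bl(states, lambda s: s[1], rq, 0, n1),
--                 _bl(states, lambda s: s[2], hq, 0, n1))
--         res.append(t if t < n1 else -1)
--     return res
-- ===== Notes on version B (the rewrite author's own statement) =====
-- stated objective: alternative
-- what changed: One list of cumulative (c,r,h) state triples built by running sums replaces A's three parallel prefix-sum lists grown by last-element reads, and a hand-written recursive binary search parameterized by a key projection replaces the three library bisect_left calls; the binary-search strategy itself is kept, since its exact answers on non-monotone cumulative lists (negative increases) are only reproducible by the same interval descent.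
import Mathlib
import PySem

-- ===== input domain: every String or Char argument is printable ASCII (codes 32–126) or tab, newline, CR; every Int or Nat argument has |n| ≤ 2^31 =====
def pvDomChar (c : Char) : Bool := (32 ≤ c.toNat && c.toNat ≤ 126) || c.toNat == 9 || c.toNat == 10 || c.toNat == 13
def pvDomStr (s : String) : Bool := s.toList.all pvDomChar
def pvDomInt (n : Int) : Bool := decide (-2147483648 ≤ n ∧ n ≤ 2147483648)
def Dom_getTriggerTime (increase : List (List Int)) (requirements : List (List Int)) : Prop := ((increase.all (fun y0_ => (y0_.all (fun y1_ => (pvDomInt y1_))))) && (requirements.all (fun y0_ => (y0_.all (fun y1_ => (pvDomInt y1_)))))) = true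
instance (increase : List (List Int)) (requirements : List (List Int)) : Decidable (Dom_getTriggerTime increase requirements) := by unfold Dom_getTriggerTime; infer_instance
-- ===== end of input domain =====

-- B keeps one list of cumulative (c,r,h) state triples built by running sums instead of A's three
-- parallel prefix lists, and searches it with a hand-written recursive binary search taking a key
-- projection instead of the three library bisect_left calls (objective: alternative).

-- ===== PORT A =====
def getTriggerTime (increase : List (List Int)) (requirements : List (List Int)) : List Int :=
  let crh := increase.foldl
    (fun (s : List Int × List Int × List Int) row =>
      (s.1 ++ [(PySem.List.pyGet? s.1 (-1)).getD 0 + row.getD 0 0],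
       s.2.1 ++ [(PySem.List.pyGet? s.2.1 (-1)).getD 0 + row.getD 1 0],
       s.2.2 ++ [(PySem.List.pyGet? s.2.2 (-1)).getD 0 + row.getD 2 0]))
    ([0], [0], [0])
  let C := crh.1
  let R := crh.2.1
  let H := crh.2.2
  let length := C.length
  requirements.foldl (fun res req =>
    let t1 := PySem.List.bisectLeft C (req.getD 0 0)
    let t2 := PySem.List.bisectLeft R (req.getD 1 0)
    let t3 := PySem.List.bisectLeft H (req.getD 2 0)
    let t := max (max t1 t2) t3
    res ++ [if t = length then (-1 : Int) else (t : Int)]) []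

-- ===== PORT B =====
-- cumulative states [(0,0,0), …], one triple per day, built by running sums
def altStates : List (List Int) → Int → Int → Int → List (Int × Int × Int)
  | [], c, r, h => [(c, r, h)]
  | row :: rest, c, r, h =>
      (c, r, h) :: altStates rest (c + row.getD 0 0) (r + row.getD 1 0) (h + row.getD 2 0)

-- B's recursive binary search `_bl` over the states, keyed by a projection
def altSearch (s : List (Int × Int × Int)) (key : (Int × Int × Int) → Int) (x : Int)
    (lo hi : Nat) : Nat :=
  if h : lo < hi then
    let mid := (lo + hi) / 2
    if key (s.getD mid (0, 0, 0)) < x then altSearch s key x (mid + 1) hi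
    else altSearch s key x lo mid
  else lo
termination_by hi - lo
decreasing_by all_goals omega

def getTriggerTime_alt (increase : List (List Int)) (requirements : List (List Int)) : List Int :=
  let states := altStates increase 0 0 0
  let n1 := states.length
  requirements.map (fun req =>
    let t := max (max (altSearch states (·.1) (req.getD 0 0) 0 n1)
                      (altSearch states (·.2.1) (req.getD 1 0) 0 n1))
                 (altSearch states (·.2.2) (req.getD 2 0) 0 n1)
    if t < n1 then (t : Int) else -1)

-- ===== PRECONDITION & SPEC =====
-- Pre_ excludes only rows not of length 3: Python's `for c,r,h in …` unpacking raises
-- ValueError there, in A and in B alike.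
def Pre_getTriggerTime (increase : List (List Int)) (requirements : List (List Int)) : Prop :=
  (∀ row ∈ increase, row.length = 3) ∧ (∀ row ∈ requirements, row.length = 3)
instance (increase : List (List Int)) (requirements : List (List Int)) : Decidable (Pre_getTriggerTime increase requirements) := by unfold Pre_getTriggerTime; infer_instance

def pvWitness_getTriggerTime : List (List Int) × List (List Int) :=
  ([[1, 2, 3], [0, -1, 0]], [[1, 1, 1], [0, 0, 0], [9, 9, 9]])

def Spec_getTriggerTime (increase : List (List Int)) (requirements : List (List Int)) (out : List Int) : Prop := out = getTriggerTime_alt increase requirements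
instance (increase : List (List Int)) (requirements : List (List Int)) (out : List Int) : Decidable (Spec_getTriggerTime increase requirements out) := by unfold Spec_getTriggerTime; infer_instance

-- ===== CLAIM (what is proved, stated in full; the proofs are below) =====
def Claim_equal_getTriggerTime : Prop := ∀ (increase : List (List Int)) (requirements : List (List Int)), Dom_getTriggerTime increase requirements → Pre_getTriggerTime increase requirements → Spec_getTriggerTime increase requirements (getTriggerTime increase requirements)

-- ===== LEMMAS AND PROOFS =====

-- the fold in A builds exactly the three columns of B's states
lemma buildA_eq (inc : List (List Int)) (C R H : List Int) (c r h : Int) :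
    inc.foldl
      (fun (s : List Int × List Int × List Int) row =>
        (s.1 ++ [(PySem.List.pyGet? s.1 (-1)).getD 0 + row.getD 0 0],
         s.2.1 ++ [(PySem.List.pyGet? s.2.1 (-1)).getD 0 + row.getD 1 0],
         s.2.2 ++ [(PySem.List.pyGet? s.2.2 (-1)).getD 0 + row.getD 2 0]))
      (C ++ [c], R ++ [r], H ++ [h]) =
    (C ++ (altStates inc c r h).map (·.1),
     R ++ (altStates inc c r h).map (·.2.1),
     H ++ (altStates inc c r h).map (·.2.2)) := by
  induction inc generalizing C R H c r h with
  | nil => simp [altStates]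
  | cons row rest ih =>
      have elast : ∀ (L : List Int) (x : Int), PySem.List.pyGet? (L ++ [x]) (-1) = some x := by
        intro L x; simp [PySem.List.pyGet?, PySem.List.pyIdx?]
      rw [List.foldl_cons]
      simp only [elast, Option.getD_some]
      rw [ih (C ++ [c]) (R ++ [r]) (H ++ [h])]
      simp [altStates, List.append_assoc]

-- B's binary search never leaves the interval
lemma altSearch_le (s : List (Int × Int × Int)) (key : (Int × Int × Int) → Int) (x : Int)
    (lo hi : Nat) : lo ≤ hi → altSearch s key x lo hi ≤ hi := by
  fun_induction altSearch with
  | case1 lo hi hlt mid hk ih => exact fun _ => ih (by omega)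
  | case2 lo hi hlt mid hk ih => exact fun _ => le_trans (ih (by omega)) (by omega)
  | case3 lo hi hge => intro; omega

-- B's recursive search computes the same interval descent as Python's bisect_left
-- (PySem's fuelled loop) over the projected column
lemma altSearch_eq_loop (s : List (Int × Int × Int)) (key : (Int × Int × Int) → Int) (x : Int)
    (fuel lo hi : Nat) (hhi : hi ≤ s.length) (hfuel : hi - lo ≤ fuel) :
    altSearch s key x lo hi = PySem.List.bisectLeftLoop (s.map key) x fuel lo hi := by
  induction fuel generalizing lo hi with
  | zero =>
      rw [altSearch]
      have : ¬ lo < hi := by omega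
      simp [this, PySem.List.bisectLeftLoop]
  | succ fuel ih =>
      rw [altSearch, PySem.List.bisectLeftLoop]
      by_cases hlt : lo < hi
      · have hmid : (lo + hi) / 2 < s.length := by omega
        have hget : (s.map key)[(lo + hi) / 2]? = some (key s[(lo + hi) / 2]) := by
          simp [hmid]
        have hgetD : s.getD ((lo + hi) / 2) (0, 0, 0) = s[(lo + hi) / 2] :=
          List.getD_eq_getElem s (0, 0, 0) hmid
        simp only [hlt, dif_pos, if_pos, hget, hgetD]
        by_cases hcmp : key s[(lo + hi) / 2] < x
        · simp only [hcmp, if_pos]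
          exact ih ((lo + hi) / 2 + 1) hi hhi (by omega)
        · simp only [hcmp, if_neg, not_false_iff]
          exact ih lo ((lo + hi) / 2) (by omega) (by omega)
      · simp [hlt]

-- ===== VERDICT (by name: the statement is the Claim_ definition above) =====
theorem getTriggerTime_spec : Claim_equal_getTriggerTime := by
  intro increase requirements _hdom _hpre
  unfold Spec_getTriggerTime getTriggerTime getTriggerTime_alt
  have hbuild := buildA_eq increase [] [] [] 0 0 0
  simp only [List.nil_append] at hbuild
  rw [hbuild]
  set s := altStates increase 0 0 0 with hs
  rw [PySem.List.foldl_append_singleton_eq_map, List.nil_append]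
  apply List.map_congr_left
  intro req _hreq
  have hlen : ∀ f : (Int × Int × Int) → Int, (s.map f).length = s.length := by simp
  have hb : ∀ (f : (Int × Int × Int) → Int) (x : Int),
      PySem.List.bisectLeft (s.map f) x = altSearch s f x 0 s.length := by
    intro f x
    rw [PySem.List.bisectLeft, hlen]
    exact (altSearch_eq_loop s f x s.length 0 s.length (le_refl _) (by omega)).symm
  rw [hlen, hb, hb, hb]
  set t := max (max (altSearch s (·.1) (req.getD 0 0) 0 s.length)
                    (altSearch s (·.2.1) (req.getD 1 0) 0 s.length))
               (altSearch s (·.2.2) (req.getD 2 0) 0 s.length) with ht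
  have h1 := altSearch_le s (·.1) (req.getD 0 0) 0 s.length (by omega)
  have h2 := altSearch_le s (·.2.1) (req.getD 1 0) 0 s.length (by omega)
  have h3 := altSearch_le s (·.2.2) (req.getD 2 0) 0 s.length (by omega)
  have hts : t ≤ s.length := by omega
  have key : (if t = s.length then (-1 : Int) else (t : Int))
      = if t < s.length then (t : Int) else -1 := by
    split_ifs <;> omega
  exact key
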